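-- pv_equiv track=rewrite | github.com/wilmurillo-ai/Design-Assistant | .skills/openclaw-skills/skills/austindixson/gateway-guard/scripts/gateway_guard.py | _mask_cmd_for_log
-- ===== SOURCE A (Python) =====
-- def _mask_cmd_for_log(cmd):
--     """Return a safe string for logging: mask --token/--password values."""
--     out = []
--     i = 0
--     while i < len(cmd):
--         arg = cmd[i]
--         if arg in ("--token", "--password") and i + 1 < len(cmd):
--             out.append(arg)
--             out.append("***")
--             i += 2
--             continue
--         out.append(arg)
--         i += 1
--     return " ".join(out)
-- ===== SOURCE B (Python) =====
-- def _mask_cmd_for_log(cmd):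
--     """Return a safe string for logging: mask --token/--password values."""
--     out = []
--     mask_next = False
--     for arg in cmd:
--         if mask_next:
--             out.append("***")
--             mask_next = False
--         else:
--             out.append(arg)
--             mask_next = arg in ("--token", "--password")
--     return " ".join(out)
-- ===== Notes on version B (the rewrite author's own statement) =====
-- stated objective: simpler
-- what changed: Replaces the index-based while loop with lookahead and i+=2 skipping by a plain forward for-loop over the elements carrying a one-bit mask_next state; no index arithmetic or lookahead, which also avoids per-step len()/indexing overhead.
import Mathlib
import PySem

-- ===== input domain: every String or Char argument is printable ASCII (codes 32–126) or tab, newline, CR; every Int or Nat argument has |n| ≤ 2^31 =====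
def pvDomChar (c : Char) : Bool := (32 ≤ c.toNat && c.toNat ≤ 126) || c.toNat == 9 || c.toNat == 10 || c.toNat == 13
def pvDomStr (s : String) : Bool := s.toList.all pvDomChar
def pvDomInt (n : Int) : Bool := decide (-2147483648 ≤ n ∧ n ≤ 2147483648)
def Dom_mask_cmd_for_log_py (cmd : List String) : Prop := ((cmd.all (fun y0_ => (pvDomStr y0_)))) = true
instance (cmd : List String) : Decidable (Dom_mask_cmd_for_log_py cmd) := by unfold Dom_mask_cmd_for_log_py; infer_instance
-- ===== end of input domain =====

-- B replaces A's index-based while loop (lookahead, i += 2 skipping) by a plain forward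
-- for-loop carrying a one-bit mask_next state; objective: simpler. Proven equal on all inputs.

-- ===== PORT A =====
-- literal port of A's while loop over index i with accumulator out
def maskA_go (cmd : List String) (i : Nat) (out : List String) : List String :=
  if h : i < cmd.length then
    let arg := cmd[i]
    if (arg == "--token" || arg == "--password") = true ∧ i + 1 < cmd.length then
      maskA_go cmd (i + 2) (out ++ [arg, "***"])
    else
      maskA_go cmd (i + 1) (out ++ [arg])
  else out
termination_by cmd.length - i

def mask_cmd_for_log_py (cmd : List String) : String :=
  PySem.Str.join " " (maskA_go cmd 0 [])

-- ===== PORT B =====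
-- literal port of B's for-loop: foldl over cmd carrying (out, mask_next)
def mask_cmd_for_log_py_alt (cmd : List String) : String :=
  PySem.Str.join " "
    (cmd.foldl
      (fun (s : List String × Bool) arg =>
        if s.2 then (s.1 ++ ["***"], false)
        else (s.1 ++ [arg], arg == "--token" || arg == "--password"))
      ([], false)).1

-- ===== PRECONDITION & SPEC =====
def Spec_mask_cmd_for_log_py (cmd : List String) (out : String) : Prop := out = mask_cmd_for_log_py_alt cmd
instance (cmd : List String) (out : String) : Decidable (Spec_mask_cmd_for_log_py cmd out) := by unfold Spec_mask_cmd_for_log_py; infer_instance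

-- ===== CLAIM (what is proved, stated in full; the proofs are below) =====
def Claim_equal_mask_cmd_for_log_py : Prop := ∀ (cmd : List String), Dom_mask_cmd_for_log_py cmd → Spec_mask_cmd_for_log_py cmd (mask_cmd_for_log_py cmd)

-- ===== LEMMAS AND PROOFS =====

-- common description of the masked word list
def mspec : List String → List String
  | [] => []
  | [a] => [a]
  | a :: b :: rest =>
    if (a == "--token" || a == "--password") = true then a :: "***" :: mspec rest
    else a :: mspec (b :: rest)

-- B's state machine as a function of the remaining suffix and the mask bit
def gspec : Bool → List String → List String
  | _, [] => []
  | true, _ :: r => "***" :: gspec false r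
  | false, a :: r => a :: gspec (a == "--token" || a == "--password") r

lemma goA_eq (cmd : List String) (i : Nat) (out : List String) :
    maskA_go cmd i out = out ++ mspec (cmd.drop i) := by
  induction i, out using maskA_go.induct cmd with
  | case1 i out h arg hc ih =>
    have hd : cmd.drop i = cmd[i] :: cmd[i+1]'hc.2 :: cmd.drop (i + 2) := by
      rw [List.drop_eq_getElem_cons h, List.drop_eq_getElem_cons hc.2]
    rw [maskA_go, dif_pos h, if_pos hc, ih, hd]
    simp only [mspec, List.append_assoc]
    rw [if_pos hc.1]
    rfl
  | case2 i out h arg hc ih =>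
    rw [maskA_go, dif_pos h, if_neg hc, ih, List.drop_eq_getElem_cons h]
    rcases hrest : cmd.drop (i + 1) with _ | ⟨b, rest⟩
    · simp only [mspec, List.append_assoc]; rfl
    · have hc' : ¬ (cmd[i] == "--token" || cmd[i] == "--password") = true := by
        intro hb
        have hlen : i + 1 < cmd.length := by
          have := congrArg List.length hrest
          simp [List.length_drop] at this
          omega
        exact hc ⟨hb, hlen⟩
      simp only [mspec, List.append_assoc]
      rw [if_neg hc']
      rfl
  | case3 i out h =>
    rw [maskA_go]
    simp [h, List.drop_eq_nil_of_le (by omega : cmd.length ≤ i), mspec]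

lemma foldB_eq (l : List String) (out : List String) (m : Bool) :
    (l.foldl
      (fun (s : List String × Bool) arg =>
        if s.2 then (s.1 ++ ["***"], false)
        else (s.1 ++ [arg], arg == "--token" || arg == "--password"))
      (out, m)).1 = out ++ gspec m l := by
  induction l generalizing out m with
  | nil => simp [gspec]
  | cons a r ih =>
    cases m with
    | true => simp [gspec, ih]
    | false => simp [gspec, ih]

lemma gspec_eq_mspec (l : List String) : gspec false l = mspec l := by
  induction l using mspec.induct with
  | case1 => rfl
  | case2 a =>
    simp [gspec, mspec]
  | case3 a b rest h ih =>
    simp [gspec, mspec, h, ih]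
  | case4 a b rest h ih =>
    simp only [Bool.not_eq_true] at h
    simp [gspec, mspec, h, ih]

-- ===== VERDICT (by name: the statement is the Claim_ definition above) =====
theorem mask_cmd_for_log_py_spec : Claim_equal_mask_cmd_for_log_py := by
  intro cmd _
  unfold Spec_mask_cmd_for_log_py mask_cmd_for_log_py mask_cmd_for_log_py_alt
  rw [goA_eq, foldB_eq, gspec_eq_mspec]
  simp only [List.drop_zero, List.nil_append]
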